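-- pv_equiv track=rewrite | github.com/Victor-Rodriguez-VR/Coding-challenges | compressSquareImage.py | compressSquareImage
-- ===== SOURCE A (Python) =====
-- def compressSquareImage(image, size):
--   # declare final output string number
--   size = str(size)
--   compressedSquareImage = size + "x"
--   currentLetter = image[0]
--   count = 0
--   # go through the entire string
--   for i in range(len(image)):
--     # check which letter we're looking at
--     if image[i] != currentLetter:
--         compressedSquareImage += currentLetter + str(count)
--         # if not, switch the count that we're adding to
--         currentLetter = image[i]
--         #clear the count of the one we were first adding to
--         count = 0
--     # add to the count of that letter
--     count += 1
--   compressedSquareImage += currentLetter + str(count)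
--
--   return compressedSquareImage
-- ===== SOURCE B (Python) =====
-- def compressSquareImage(image, size):
--     # Staged passes: (1) find all positions where the character changes,
--     # (2) derive each run's length by subtracting consecutive boundary indices.
--     n = len(image)
--     starts = [0] + [i for i in range(1, n) if image[i] != image[i - 1]]
--     ends = starts[1:] + [n]
--     return str(size) + "x" + "".join(image[s] + str(e - s) for s, e in zip(starts, ends))
-- ===== Notes on version B (the rewrite author's own statement) =====
-- stated objective: alternative
-- what changed: Replaces A's single-pass currentLetter/count state machine with staged passes: first compute the list of change-boundary indices, then obtain each run's length by subtracting consecutive boundaries (zip of starts with ends) — no counting during traversal.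
import Mathlib
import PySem

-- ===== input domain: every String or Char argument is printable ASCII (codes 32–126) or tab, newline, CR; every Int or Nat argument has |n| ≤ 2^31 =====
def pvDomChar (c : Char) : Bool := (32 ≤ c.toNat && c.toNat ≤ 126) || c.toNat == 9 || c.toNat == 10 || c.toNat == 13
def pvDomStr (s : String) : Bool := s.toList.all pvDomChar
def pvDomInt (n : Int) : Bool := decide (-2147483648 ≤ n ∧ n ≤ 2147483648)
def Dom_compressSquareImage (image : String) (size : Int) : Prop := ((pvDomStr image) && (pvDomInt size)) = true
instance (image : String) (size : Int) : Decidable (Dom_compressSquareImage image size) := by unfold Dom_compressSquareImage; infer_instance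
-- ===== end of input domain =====

-- B replaces A's single-pass counter state machine with staged passes (change-boundary
-- indices, then run lengths by subtraction); objective: alternative, same O(n) cost.
-- Equivalence on non-empty images (both raise IndexError on "").

-- ===== PORT A =====
-- one loop iteration of A: state = (accumulated output, currentLetter, count)
def pvAStep (st : String × Char × Int) (c : Char) : String × Char × Int :=
  if c ≠ st.2.1 then (st.1 ++ String.ofList [st.2.1] ++ PySem.Int.toStr st.2.2, c, 1)
  else (st.1, st.2.1, st.2.2 + 1)

def compressSquareImage (image : String) (size : Int) : String :=
  match image.toList with
  | [] => ""   -- image[0] raises IndexError in Python; excluded by Pre_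
  | c0 :: _ =>
    let st := image.toList.foldl pvAStep (PySem.Int.toStr size ++ "x", c0, (0 : Int))
    st.1 ++ String.ofList [st.2.1] ++ PySem.Int.toStr st.2.2

-- ===== PORT B =====
-- the comprehension [i for i in range(1, n) if image[i] != image[i-1]]; the indices
-- range over 1..n-1, all non-negative and in range, so range(1,n) is ported as
-- List.range' 1 (n-1) over Nat and image[i] as getD (exact on these in-range indices)
def pvChanges (l : List Char) : List Nat :=
  (List.range' 1 (l.length - 1)).filter (fun i => !(l.getD i ' ' == l.getD (i - 1) ' '))

def compressSquareImage_alt (image : String) (size : Int) : String :=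
  let l := image.toList
  let n := l.length
  let starts := 0 :: pvChanges l
  let ends := starts.tail ++ [n]
  PySem.Int.toStr size ++ "x" ++
    String.join ((starts.zip ends).map
      (fun p => String.ofList [l.getD p.1 ' '] ++ PySem.Int.toStr ((p.2 : Int) - (p.1 : Int))))

-- ===== PRECONDITION & SPEC =====
-- Pre_ excludes exactly the empty image, on which A (and B) raise IndexError.
def Pre_compressSquareImage (image : String) (size : Int) : Prop := image ≠ ""
instance (image : String) (size : Int) : Decidable (Pre_compressSquareImage image size) := by
  unfold Pre_compressSquareImage; infer_instance

def pvWitness_compressSquareImage : String × Int := ("aab", 3)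

def Spec_compressSquareImage (image : String) (size : Int) (out : String) : Prop := out = compressSquareImage_alt image size
instance (image : String) (size : Int) (out : String) : Decidable (Spec_compressSquareImage image size out) := by unfold Spec_compressSquareImage; infer_instance

-- ===== CLAIM =====
def Claim_equal_compressSquareImage : Prop := ∀ (image : String) (size : Int), Dom_compressSquareImage image size → Pre_compressSquareImage image size → Spec_compressSquareImage image size (compressSquareImage image size)

-- ===== LEMMAS AND PROOFS =====

-- the common characterisation both ports are reduced to: the list of consecutive runs
def pvRuns : List Char → List (Char × Nat)
  | [] => []
  | c :: cs =>
    (c, (cs.takeWhile (· == c)).length + 1) :: pvRuns (cs.dropWhile (· == c))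
  termination_by l => l.length
  decreasing_by
    exact Nat.lt_succ_of_le (List.length_dropWhile_le _ _)

def pvRender (l : List Char) : String :=
  String.join ((pvRuns l).map (fun g => String.ofList [g.1] ++ PySem.Int.toStr (g.2 : Int)))

theorem pvJoin_foldl (l : List String) : ∀ a : String,
    l.foldl (· ++ ·) a = a ++ l.foldl (· ++ ·) "" := by
  induction l with
  | nil => simp
  | cons s l ih =>
    intro a
    simp only [List.foldl_cons]
    rw [ih, ih ("" ++ s)]
    simp [String.append_assoc]

-- A's loop invariant: finishing the fold from state (acc, cur, cnt) yields acc, then the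
-- current run (cur, cnt + leading copies of cur in cs), then the rendering of the rest
theorem pvA_loop (cs : List Char) : ∀ (acc : String) (cur : Char) (cnt : Int),
    (cs.foldl pvAStep (acc, cur, cnt)).1
        ++ String.ofList [(cs.foldl pvAStep (acc, cur, cnt)).2.1]
        ++ PySem.Int.toStr (cs.foldl pvAStep (acc, cur, cnt)).2.2
      = acc ++ String.ofList [cur] ++ PySem.Int.toStr (cnt + ((cs.takeWhile (· == cur)).length : Int))
          ++ pvRender (cs.dropWhile (· == cur)) := by
  induction cs with
  | nil =>
    intro acc cur cnt
    simp [pvRender, pvRuns, String.join]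
  | cons c cs ih =>
    intro acc cur cnt
    by_cases h : c = cur
    · subst h
      simp only [List.foldl_cons, pvAStep, ne_eq, not_true_eq_false, reduceIte,
        List.takeWhile_cons, List.dropWhile_cons, beq_self_eq_true, if_pos]
      rw [ih]
      have : cnt + 1 + ((cs.takeWhile (· == c)).length : Int)
           = cnt + (((cs.takeWhile (· == c)).length + 1 : Nat) : Int) := by push_cast; ring
      simp [this]
    · have hb : (c == cur) = false := by simp [h]
      simp only [List.foldl_cons, pvAStep, ne_eq, h, not_false_eq_true, if_pos,
        List.takeWhile_cons, List.dropWhile_cons, hb, Bool.false_eq_true, reduceIte]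
      rw [ih]
      have hrc : pvRender (c :: cs)
           = String.ofList [c] ++ PySem.Int.toStr ((((cs.takeWhile (· == c)).length + 1 : Nat)) : Int)
             ++ pvRender (cs.dropWhile (· == c)) := by
        simp only [pvRender, pvRuns, String.join, List.map_cons, List.foldl_cons]
        rw [pvJoin_foldl]
        simp [String.append_assoc]
      have h1 : (1 : Int) + ((cs.takeWhile (· == c)).length : Int)
              = (((cs.takeWhile (· == c)).length + 1 : Nat) : Int) := by push_cast; ring
      rw [hrc, h1]
      simp [String.append_assoc]

-- B-side: the zip-of-boundaries rendering equals the run rendering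
def pvRenderB (l : List Char) : List String :=
  ((0 :: pvChanges l).zip (pvChanges l ++ [l.length])).map
    (fun p => String.ofList [l.getD p.1 ' '] ++ PySem.Int.toStr ((p.2 : Int) - (p.1 : Int)))

theorem pvDropWhile_head_false {c x : Char} {rest xs : List Char}
    (hd : rest.dropWhile (· == c) = x :: xs) : (x == c) = false := by
  have := List.head?_dropWhile_not (· == c) rest
  rw [hd] at this; simpa using this

theorem pvGetD_low (c : Char) (rest : List Char) (j : Nat)
    (hj : j ≤ (rest.takeWhile (· == c)).length) :
    (c :: rest).getD j ' ' = c := by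
  cases j with
  | zero => rfl
  | succ j =>
    have hr : rest = rest.takeWhile (· == c) ++ rest.dropWhile (· == c) :=
      (List.takeWhile_append_dropWhile).symm
    have hj' : j < (rest.takeWhile (· == c)).length := by omega
    have h0 : (c :: rest).getD (j+1) ' ' = rest.getD j ' ' := rfl
    rw [h0, hr, List.getD_append _ _ _ _ hj', List.getD_eq_getElem _ _ hj']
    have hmem := List.getElem_mem (l := rest.takeWhile (· == c)) (h := hj')
    have := List.mem_takeWhile_imp hmem
    simpa using this

theorem pvGetD_high (c : Char) (rest : List Char) (m : Nat) :
    (c :: rest).getD (m + ((rest.takeWhile (· == c)).length + 1)) ' '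
      = (rest.dropWhile (· == c)).getD m ' ' := by
  have hr : c :: rest = (c :: rest.takeWhile (· == c)) ++ rest.dropWhile (· == c) := by
    simp [List.takeWhile_append_dropWhile]
  rw [hr, List.getD_append_right _ _ _ _ (by simp)]
  simp

theorem pvChanges_first_run (c : Char) (rest : List Char) :
    pvChanges (c :: rest) =
      (match rest.dropWhile (· == c) with
       | [] => []
       | _ :: _ => ((rest.takeWhile (· == c)).length + 1)
             :: (pvChanges (rest.dropWhile (· == c))).map (· + ((rest.takeWhile (· == c)).length + 1))) := by
  have hlen : (c :: rest).length - 1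
      = (rest.takeWhile (· == c)).length + (rest.dropWhile (· == c)).length := by
    have h0 : rest.length = (rest.takeWhile (· == c)).length + (rest.dropWhile (· == c)).length := by
      rw [← List.length_append, List.takeWhile_append_dropWhile]
    simp [h0]
  have hsplit : List.range' 1 ((rest.takeWhile (· == c)).length + (rest.dropWhile (· == c)).length)
      = List.range' 1 (rest.takeWhile (· == c)).length
        ++ List.range' (1 + (rest.takeWhile (· == c)).length) (rest.dropWhile (· == c)).length := by
    have := @List.range'_append 1 (rest.takeWhile (· == c)).length (rest.dropWhile (· == c)).length 1
    simpa using this.symm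
  have h1 : (List.range' 1 (rest.takeWhile (· == c)).length).filter
      (fun i => !((c :: rest).getD i ' ' == (c :: rest).getD (i - 1) ' ')) = [] := by
    rw [List.filter_eq_nil_iff]
    intro i hi
    have hib := List.mem_range'_1.mp hi
    have e1 : (c :: rest).getD i ' ' = c := pvGetD_low c rest i (by omega)
    have e2 : (c :: rest).getD (i - 1) ' ' = c := pvGetD_low c rest (i-1) (by omega)
    rw [Bool.not_eq_true, Bool.not_eq_false', e1, e2]
    simp
  unfold pvChanges
  rw [hlen, hsplit, List.filter_append, h1, List.nil_append]
  cases hd : rest.dropWhile (· == c) with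
  | nil => simp
  | cons x xs =>
    have hr1 : List.range' (1 + (rest.takeWhile (· == c)).length) (x :: xs).length
        = ((rest.takeWhile (· == c)).length + 1) :: List.range' ((rest.takeWhile (· == c)).length + 2) xs.length := by
      rw [Nat.add_comm 1 _, show (x :: xs).length = xs.length + 1 from rfl, List.range'_succ]
    have hpk : (!((c :: rest).getD ((rest.takeWhile (· == c)).length + 1) ' '
            == (c :: rest).getD ((rest.takeWhile (· == c)).length + 1 - 1) ' ')) = true := by
      have e1 : (c :: rest).getD ((rest.takeWhile (· == c)).length + 1) ' ' = x := by
        have := pvGetD_high c rest 0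
        rw [hd] at this
        simpa using this
      have e2 : (c :: rest).getD ((rest.takeWhile (· == c)).length + 1 - 1) ' ' = c :=
        pvGetD_low c rest _ (by omega)
      have hx := pvDropWhile_head_false (c := c) (x := x) (xs := xs) hd
      rw [e1, e2]
      simpa using hx
    have hr2 : List.range' ((rest.takeWhile (· == c)).length + 2) xs.length
        = (List.range' 1 xs.length).map (· + ((rest.takeWhile (· == c)).length + 1)) := by
      rw [List.range'_eq_map_range, List.range'_eq_map_range, List.map_map]
      apply List.map_congr_left; intro j _; simp; omega
    have hq : ∀ j ∈ List.range' 1 xs.length,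
        ((fun i => !((c :: rest).getD i ' ' == (c :: rest).getD (i - 1) ' '))
          ∘ (· + ((rest.takeWhile (· == c)).length + 1))) j
        = (fun i => !((rest.dropWhile (· == c)).getD i ' '
            == (rest.dropWhile (· == c)).getD (i - 1) ' ')) j := by
      intro j hj
      have hjb := List.mem_range'_1.mp hj
      have e1 : (c :: rest).getD (j + ((rest.takeWhile (· == c)).length + 1)) ' '
          = (rest.dropWhile (· == c)).getD j ' ' := pvGetD_high c rest j
      have e2 : (c :: rest).getD (j + ((rest.takeWhile (· == c)).length + 1) - 1) ' '
          = (rest.dropWhile (· == c)).getD (j - 1) ' ' := by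
        have h3 : j + ((rest.takeWhile (· == c)).length + 1) - 1
            = (j - 1) + ((rest.takeWhile (· == c)).length + 1) := by omega
        rw [h3]; exact pvGetD_high c rest (j-1)
      simp only [Function.comp_apply]
      rw [e1, e2]
    have hdl : (rest.dropWhile (· == c)).length - 1 = xs.length := by rw [hd]; simp
    rw [hr1, List.filter_cons, if_pos hpk, hr2, List.filter_map, List.filter_congr hq]
    simp [hd]

theorem pvRenderB_eq (l : List Char) (h : l ≠ []) :
    pvRenderB l = (pvRuns l).map (fun g => String.ofList [g.1] ++ PySem.Int.toStr (g.2 : Int)) := by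
  match l with
  | c :: rest =>
    have hfr := pvChanges_first_run c rest
    cases hd : rest.dropWhile (· == c) with
    | nil =>
      rw [hd] at hfr
      simp only [] at hfr
      have hlr : rest.length = (rest.takeWhile (· == c)).length := by
        conv_lhs => rw [← List.takeWhile_append_dropWhile (p := (· == c)) (l := rest)]
        rw [hd]; simp
      rw [pvRenderB, hfr, pvRuns, hd]
      simp [pvRuns, hlr]
    | cons x xs =>
      rw [hd] at hfr
      simp only [] at hfr
      have ih := pvRenderB_eq (x :: xs) (by simp)
      have hn : rest.length + 1
          = (x :: xs).length + ((rest.takeWhile (· == c)).length + 1) := by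
        have h0 : rest.length
            = (rest.takeWhile (· == c)).length + (rest.dropWhile (· == c)).length := by
          rw [← List.length_append, List.takeWhile_append_dropWhile]
        rw [hd] at h0
        simp only [List.length_cons] at h0 ⊢
        omega
      rw [pvRenderB, hfr]
      have hz : (((((rest.takeWhile (· == c)).length + 1)
              :: (pvChanges (x :: xs)).map (· + ((rest.takeWhile (· == c)).length + 1))).zip
            ((pvChanges (x :: xs)).map (· + ((rest.takeWhile (· == c)).length + 1))
              ++ [(c :: rest).length])))
          = ((0 :: pvChanges (x :: xs)).zip (pvChanges (x :: xs) ++ [(x :: xs).length])).map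
              (Prod.map (· + ((rest.takeWhile (· == c)).length + 1))
                        (· + ((rest.takeWhile (· == c)).length + 1))) := by
        have e1 : ((rest.takeWhile (· == c)).length + 1)
              :: (pvChanges (x :: xs)).map (· + ((rest.takeWhile (· == c)).length + 1))
            = (0 :: pvChanges (x :: xs)).map (· + ((rest.takeWhile (· == c)).length + 1)) := by
          simp
        have e2 : (pvChanges (x :: xs)).map (· + ((rest.takeWhile (· == c)).length + 1))
              ++ [(c :: rest).length]
            = (pvChanges (x :: xs) ++ [(x :: xs).length]).map
                (· + ((rest.takeWhile (· == c)).length + 1)) := by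
          have hn2 : (c :: rest).length = (x :: xs).length + ((rest.takeWhile (· == c)).length + 1) := by
            simp only [List.length_cons] at hn ⊢; omega
          simp [hn2]
        rw [e1, e2, List.zip_map]
      have hpt : ∀ p ∈ (0 :: pvChanges (x :: xs)).zip (pvChanges (x :: xs) ++ [(x :: xs).length]),
          ((fun p : Nat × Nat => String.ofList [(c :: rest).getD p.1 ' ']
              ++ PySem.Int.toStr ((p.2 : Int) - (p.1 : Int)))
            ∘ Prod.map (· + ((rest.takeWhile (· == c)).length + 1))
                       (· + ((rest.takeWhile (· == c)).length + 1))) p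
          = (fun p : Nat × Nat => String.ofList [(x :: xs).getD p.1 ' ']
              ++ PySem.Int.toStr ((p.2 : Int) - (p.1 : Int))) p := by
        rintro ⟨p1, p2⟩ _
        have e1 : (c :: rest).getD (p1 + ((rest.takeWhile (· == c)).length + 1)) ' '
            = (x :: xs).getD p1 ' ' := by
          have h5 := pvGetD_high c rest p1
          rw [hd] at h5; exact h5
        have e2 : (((p2 + ((rest.takeWhile (· == c)).length + 1) : Nat)) : Int)
              - (((p1 + ((rest.takeWhile (· == c)).length + 1) : Nat)) : Int)
            = (p2 : Int) - (p1 : Int) := by push_cast; ring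
        simp only [Function.comp_apply, Prod.map_apply]
        rw [e1, e2]
      have hB : pvRenderB (x :: xs)
          = ((0 :: pvChanges (x :: xs)).zip (pvChanges (x :: xs) ++ [(x :: xs).length])).map
              (fun p : Nat × Nat => String.ofList [(x :: xs).getD p.1 ' ']
                ++ PySem.Int.toStr ((p.2 : Int) - (p.1 : Int))) := by
        rw [pvRenderB]
      have hruns : pvRuns (c :: rest)
          = (c, (rest.takeWhile (· == c)).length + 1) :: pvRuns (rest.dropWhile (· == c)) := by
        rw [pvRuns]
      rw [List.cons_append, List.zip_cons_cons, List.map_cons, hruns, hd, List.map_cons]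
      congr 1
      rw [hz, List.map_map, List.map_congr_left hpt, ← hB, ih]
  termination_by l.length
  decreasing_by
    have := List.length_dropWhile_le (· == c) rest
    rw [hd] at this
    simp only [List.length_cons] at this ⊢
    omega


-- ===== VERDICT =====
theorem compressSquareImage_spec : Claim_equal_compressSquareImage := by
  intro image size _ hpre
  unfold Spec_compressSquareImage compressSquareImage compressSquareImage_alt
  cases him : image.toList with
  | nil => exact absurd (by cases image; simpa using him) hpre
  | cons c0 rest =>
    simp only
    have hloop := pvA_loop rest (PySem.Int.toStr size ++ "x") c0 (0 + 1)
    simp only [List.foldl_cons, pvAStep, ne_eq, not_true_eq_false, reduceIte]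
    rw [hloop]
    have h1 : (0 : Int) + 1 + ((rest.takeWhile (· == c0)).length : Int)
         = (((rest.takeWhile (· == c0)).length + 1 : Nat) : Int) := by push_cast; ring
    rw [h1]
    have hB := pvRenderB_eq (c0 :: rest) (by simp)
    rw [show ((0 :: pvChanges (c0::rest)).zip ((0 :: pvChanges (c0::rest)).tail ++ [(c0::rest).length]))
          = ((0 :: pvChanges (c0::rest)).zip (pvChanges (c0::rest) ++ [(c0::rest).length])) from rfl]
    rw [show ((0 :: pvChanges (c0::rest)).zip (pvChanges (c0::rest) ++ [(c0::rest).length])).map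
          (fun p => String.ofList [(c0::rest).getD p.1 ' '] ++ PySem.Int.toStr ((p.2 : Int) - (p.1 : Int)))
        = pvRenderB (c0 :: rest) from rfl]
    rw [hB]
    simp only [pvRuns, List.map_cons, String.join, List.foldl_cons]
    conv_rhs => rw [pvJoin_foldl]
    simp [pvRender, String.join, String.append_assoc]
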